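-- pv_equiv track=rewrite | github.com/MatJoss/RAG-DPO | src/processing/chunking_strategy.py | _segment_sheet_zones
-- ===== SOURCE A (Python) =====
-- from typing import List, Dict, Tuple, Optional
--
-- def _segment_sheet_zones(rows: List[List[str]]) -> List[List[List[str]]]:
--     """Segmente une feuille en zones sémantiques séparées par des lignes vides."""
--     zones = []
--     current_zone = []
--
--     for row in rows:
--         non_empty = [c for c in row if c.strip()]
--         if not non_empty:
--             if current_zone:
--                 zones.append(current_zone)
--                 current_zone = []
--         else:
--             current_zone.append(row)
--
--     if current_zone:
--         zones.append(current_zone)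
--
--     # Fusionner zones trop petites (1 ligne) avec la suivante
--     merged = []
--     buffer = None
--     for zone in zones:
--         if buffer is not None:
--             merged.append(buffer + zone)
--             buffer = None
--         elif len(zone) == 1:
--             max_cell = max((len(c) for c in zone[0] if c.strip()), default=0)
--             if max_cell > 200:
--                 merged.append(zone)
--             else:
--                 buffer = zone
--         else:
--             merged.append(zone)
--
--     if buffer:
--         if merged:
--             merged[-1] = merged[-1] + buffer
--         else:
--             merged.append(buffer)
--
--     return merged
-- ===== SOURCE B (Python) =====
-- from typing import List
--
-- def _segment_sheet_zones(rows: List[List[str]]) -> List[List[List[str]]]: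
--     """Segment a sheet into zones separated by blank rows, merging small singleton zones."""
--     def is_blank(row):
--         return all(not c.strip() for c in row)
--
--     def is_small(zone):
--         return len(zone) == 1 and \
--             max((len(c) for c in zone[0] if c.strip()), default=0) <= 200
--
--     # split into zones: skip blank rows, take maximal runs of non-blank rows
--     zones = []
--     i, n = 0, len(rows)
--     while i < n:
--         if is_blank(rows[i]):
--             i += 1
--         else:
--             j = i
--             while j < n and not is_blank(rows[j]):
--                 j += 1
--             zones.append(rows[i:j])
--             i = j
--
--     # merge: index loop with lookahead instead of a carry buffer
--     out = []
--     k, m = 0, len(zones)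
--     while k < m:
--         z = zones[k]
--         if is_small(z):
--             if k + 1 < m:
--                 out.append(z + zones[k + 1])
--                 k += 2
--             else:
--                 if out:
--                     out[-1] = out[-1] + z
--                 else:
--                     out.append(z)
--                 k += 1
--         else:
--             out.append(z)
--             k += 1
--     return out
-- ===== Notes on version B (the rewrite author's own statement) =====
-- stated objective: alternative
-- what changed: A's two folds carrying deferred state (a pending current_zone, then an Optional buffer with a post-loop fix-up) are replaced by a takeWhile/drop run splitter over blank-separated rows and an index loop with explicit lookahead that merges a small singleton zone with the next zone on the spot.
import Mathlib
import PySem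

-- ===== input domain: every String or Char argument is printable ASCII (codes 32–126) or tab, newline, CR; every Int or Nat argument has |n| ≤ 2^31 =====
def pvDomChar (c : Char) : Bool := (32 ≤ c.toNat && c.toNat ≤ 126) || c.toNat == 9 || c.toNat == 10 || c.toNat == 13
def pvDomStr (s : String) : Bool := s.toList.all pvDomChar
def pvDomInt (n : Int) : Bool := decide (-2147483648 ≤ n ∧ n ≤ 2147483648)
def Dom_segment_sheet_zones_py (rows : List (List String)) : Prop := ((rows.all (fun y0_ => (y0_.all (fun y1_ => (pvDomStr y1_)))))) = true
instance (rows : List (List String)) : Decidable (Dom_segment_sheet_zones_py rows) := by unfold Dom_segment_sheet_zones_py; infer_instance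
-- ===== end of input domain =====

-- B replaces A's two carry-state folds (pending current_zone / deferred buffer) by a
-- takeWhile/drop run splitter and a lookahead merge that pattern-matches two zones at once
-- (objective: alternative decomposition, same cost).

-- shared helpers: the cell-truthiness test and the max-cell-length expression
-- (identical expressions in both Pythons)
def pvTruthy (c : String) : Bool := !(PySem.Str.strip c == "")

def pvMaxCell (row : List String) : Int :=
  (PySem.List.max? ((row.filter pvTruthy).map PySem.Str.len) (fun x => x)).getD 0

-- ===== PORT A =====
-- A's first pass: fold carrying (zones, current_zone)
def segStepA (st : List (List (List String)) × List (List String)) (row : List String) :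
    List (List (List String)) × List (List String) :=
  if (row.filter pvTruthy).isEmpty then
    if st.2.isEmpty then st else (st.1 ++ [st.2], ([] : List (List String)))
  else (st.1, st.2 ++ [row])

-- A's second pass: fold carrying (merged, buffer)
def mergeStepA (st : List (List (List String)) × Option (List (List String)))
    (zone : List (List String)) :
    List (List (List String)) × Option (List (List String)) :=
  match st.2 with
  | some b => (st.1 ++ [b ++ zone], none)
  | none =>
    if zone.length == 1 then
      if pvMaxCell (zone.headD []) > 200 then (st.1 ++ [zone], none)
      else (st.1, some zone)
    else (st.1 ++ [zone], none)

def segment_sheet_zones_py (rows : List (List String)) : List (List (List String)) :=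
  let st := rows.foldl segStepA ([], [])
  let zones := if st.2.isEmpty then st.1 else st.1 ++ [st.2]
  let mst := zones.foldl mergeStepA ([], none)
  match mst.2 with
  | none => mst.1
  | some b =>
    if b.isEmpty then mst.1
    else if mst.1.isEmpty then [b]
    else mst.1.dropLast ++ [(mst.1.getLast?.getD []) ++ b]

-- ===== PORT B =====
def pvBlank (row : List String) : Bool := row.all (fun c => !pvTruthy c)

def pvSmall (zone : List (List String)) : Bool :=
  zone.length == 1 && pvMaxCell (zone.headD []) ≤ 200

-- B's splitter: skip blank rows, take the maximal non-blank run, recurse on the rest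
def splitZonesB : List (List String) → List (List (List String))
  | [] => []
  | r :: rs =>
    if pvBlank r then splitZonesB rs
    else
      let z := (r :: rs).takeWhile (fun x => !pvBlank x)
      z :: splitZonesB ((r :: rs).drop z.length)
termination_by rows => rows.length
decreasing_by
  · simp
  · rename_i h
    simp [h, List.length_drop]

-- B's merge: index loop with lookahead, ported as recursion matching two zones
def mergeB (out : List (List (List String))) :
    List (List (List String)) → List (List (List String))
  | [] => out
  | z :: rest =>
    if pvSmall z then
      match rest with
      | z2 :: rest2 => mergeB (out ++ [z ++ z2]) rest2
      | [] =>
        if out.isEmpty then out ++ [z]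
        else out.dropLast ++ [(out.getLast?.getD []) ++ z]
    else mergeB (out ++ [z]) rest

def segment_sheet_zones_py_alt (rows : List (List String)) : List (List (List String)) :=
  mergeB [] (splitZonesB rows)

-- ===== PRECONDITION & SPEC =====
def Spec_segment_sheet_zones_py (rows : List (List String)) (out : List (List (List String))) : Prop := out = segment_sheet_zones_py_alt rows
instance (rows : List (List String)) (out : List (List (List String))) : Decidable (Spec_segment_sheet_zones_py rows out) := by unfold Spec_segment_sheet_zones_py; infer_instance

-- ===== CLAIM (what is proved, stated in full; the proofs are below) =====
def Claim_equal_segment_sheet_zones_py : Prop := ∀ (rows : List (List String)), Dom_segment_sheet_zones_py rows → Spec_segment_sheet_zones_py rows (segment_sheet_zones_py rows)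

-- ===== LEMMAS AND PROOFS =====

-- blank-row tests agree
theorem blank_eq (row : List String) : (row.filter pvTruthy).isEmpty = pvBlank row := by
  induction row with
  | nil => rfl
  | cons c cs ih =>
    by_cases h : pvTruthy c = true <;>
      simp [pvBlank, h, List.all_cons] <;>
      simpa [pvBlank] using ih

-- an auxiliary form of A's segmentation with a pending current zone
def splitAux (cur : List (List String)) : List (List String) → List (List (List String))
  | [] => if cur.isEmpty then [] else [cur]
  | r :: rs =>
    if pvBlank r then (if cur.isEmpty then splitAux [] rs else cur :: splitAux [] rs)
    else splitAux (cur ++ [r]) rs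

def finishSeg (st : List (List (List String)) × List (List String)) :
    List (List (List String)) :=
  if st.2.isEmpty then st.1 else st.1 ++ [st.2]

theorem segA_eq_splitAux (rows : List (List String)) :
    ∀ (zs : List (List (List String))) (cur : List (List String)),
      finishSeg (rows.foldl segStepA (zs, cur)) = zs ++ splitAux cur rows := by
  induction rows with
  | nil =>
    intro zs cur
    simp only [List.foldl_nil, finishSeg, splitAux]
    split_ifs <;> simp
  | cons r rs ih =>
    intro zs cur
    simp only [List.foldl_cons, splitAux, segStepA, blank_eq]
    by_cases hb : pvBlank r = true
    · by_cases hc : cur.isEmpty = true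
      · have : cur = [] := by simpa using hc
        subst this
        simp [hb, ih]
      · simp [hb, hc, ih]
    · simp [hb, ih]

-- splitAux vs B's splitter
theorem splitAux_eq (rows : List (List String)) :
    ∀ (cur : List (List String)),
      splitAux cur rows =
        if cur.isEmpty then splitZonesB rows
        else (cur ++ rows.takeWhile (fun x => !pvBlank x)) ::
          splitZonesB (rows.drop (rows.takeWhile (fun x => !pvBlank x)).length) := by
  induction rows with
  | nil =>
    intro cur
    simp only [splitAux, splitZonesB.eq_1, List.takeWhile_nil, List.drop_nil]
    split_ifs <;> simp
  | cons r rs ih =>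
    intro cur
    by_cases hb : pvBlank r = true
    · have hB : splitZonesB (r :: rs) = splitZonesB rs := by
        rw [splitZonesB]; simp [hb]
      by_cases hc : cur.isEmpty = true
      · simp [splitAux, hb, hc, ih, hB]
      · simp [splitAux, hb, hc, ih, hB]
    · have hB : splitZonesB (r :: rs) =
          (r :: rs.takeWhile (fun x => !pvBlank x)) ::
            splitZonesB (rs.drop (rs.takeWhile (fun x => !pvBlank x)).length) := by
        rw [splitZonesB.eq_2]
        simp [hb]
      by_cases hc : cur.isEmpty = true
      · have : cur = [] := by simpa using hc
        subst this
        simp [splitAux, hb, ih, hB]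
      · simp [splitAux, hb, hc, ih]

def finishMerge (st : List (List (List String)) × Option (List (List String))) :
    List (List (List String)) :=
  match st.2 with
  | none => st.1
  | some b =>
    if b.isEmpty then st.1
    else if st.1.isEmpty then [b]
    else st.1.dropLast ++ [(st.1.getLast?.getD []) ++ b]

theorem mergeA_eq_mergeB (out : List (List (List String)))
    (zones : List (List (List String))) :
    finishMerge (zones.foldl mergeStepA (out, none)) = mergeB out zones := by
  fun_induction mergeB out zones with
  | case1 out => rfl
  | case2 out z hs z2 rest2 ih =>
    rw [pvSmall, Bool.and_eq_true, beq_iff_eq, decide_eq_true_eq] at hs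
    have h2 : ¬ pvMaxCell (z.headD []) > 200 := by omega
    simp only [List.foldl_cons, mergeStepA, hs.1, beq_self_eq_true, if_true, h2, if_neg,
      not_false_eq_true]
    simpa [mergeStepA] using ih
  | case3 out z hs ho =>
    rw [pvSmall, Bool.and_eq_true, beq_iff_eq, decide_eq_true_eq] at hs
    have h2 : ¬ pvMaxCell (z.headD []) > 200 := by omega
    have hz : z.isEmpty = false := by
      cases z <;> simp_all
    simp only [List.foldl_cons, List.foldl_nil, mergeStepA, hs.1, beq_self_eq_true, if_true, h2,
      not_false_eq_true, if_neg]
    have ho' : out = [] := by simpa using ho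
    subst ho'
    simp [finishMerge, hz]
  | case4 out z hs ho =>
    rw [pvSmall, Bool.and_eq_true, beq_iff_eq, decide_eq_true_eq] at hs
    have h2 : ¬ pvMaxCell (z.headD []) > 200 := by omega
    have hz : z.isEmpty = false := by
      cases z <;> simp_all
    simp only [List.foldl_cons, List.foldl_nil, mergeStepA, hs.1, beq_self_eq_true, if_true, h2,
      not_false_eq_true, if_neg]
    simp [finishMerge, hz, ho]
  | case5 out z rest hs ih =>
    rw [pvSmall, Bool.and_eq_true, not_and_or] at hs
    simp only [List.foldl_cons, mergeStepA]
    rcases hs with h | h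
    · have h1 : ¬ z.length == 1 := by simpa using h
      simpa [h1] using ih
    · by_cases h1 : (z.length == 1) = true
      · have h2 : pvMaxCell (z.headD []) > 200 := by
          simp only [decide_eq_true_eq] at h
          omega
        simp only [List.headD_eq_head?_getD] at h2
        simpa [h1, h2] using ih
      · simpa [h1] using ih

-- ===== VERDICT (by name: the statement is the Claim_ definition above) =====
theorem segment_sheet_zones_py_spec : Claim_equal_segment_sheet_zones_py := by
  intro rows _
  show finishMerge (List.foldl mergeStepA ([], none)
      (finishSeg (List.foldl segStepA ([], []) rows))) = segment_sheet_zones_py_alt rows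
  rw [segA_eq_splitAux rows [] [], splitAux_eq rows []]
  simp only [List.isEmpty_nil, if_true, List.nil_append]
  rw [mergeA_eq_mergeB]
  rfl
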